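-- pv_equiv track=rewrite | github.com/tychospadaro/Projects | Flurry/ticket_processing.py | count_tix
-- ===== SOURCE A (Python) =====
-- def count_tix(list_in):
--     """
--     Inputs:
--         list_in - cleaned data list
--     Output:
--         Dictionary with count for each ticket type.
--     """
--
--     ticket_dict = {
--         'Child': 0,
--         'FULL FESTIVAL':0,
--         'FRIDAY NIGHT':0,
--         'SATURDAY DAY':0,
--         'SATURDAY NIGHT':0,
--         'ALL SATURDAY':0,
--         'ALL SUNDAY':0,
--         }
--
--     for order in list_in:
--         tickets = order[-1]
--         for ticket in tickets:
--             quant, sep, session = ticket.partition(' ')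
--             for ticket_type in ticket_dict:
--                 if ticket_type in session:
--                     ticket_dict[ticket_type] = ticket_dict[ticket_type] + int(quant)
--     return ticket_dict
-- ===== SOURCE B (Python) =====
-- def count_tix(list_in):
--     # Pass 1: group quantity strings by their session string (hash index built once).
--     buckets = {}
--     for order in list_in:
--         for ticket in order[-1]:
--             quant, _, session = ticket.partition(' ')
--             buckets.setdefault(session, []).append(quant)
--     # Pass 2: each type's count comes from the distinct sessions that contain it.
--     return {t: sum(int(q)
--                    for s, qs in buckets.items() if t in s
--                    for q in qs)
--             for t in ('Child', 'FULL FESTIVAL', 'FRIDAY NIGHT', 'SATURDAY DAY',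
--                       'SATURDAY NIGHT', 'ALL SATURDAY', 'ALL SUNDAY')}
-- ===== Notes on version B (the rewrite author's own statement) =====
-- stated objective: alternative
-- what changed: Replaces A's single pass that mutates the 7-counter dict per ticket by a two-stage algorithm: pass 1 builds a session->quantity-strings index with setdefault/append, pass 2 derives each type's total from the distinct sessions' buckets, so the substring tests run once per (type, distinct session) instead of once per (type, ticket).
import Mathlib
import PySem

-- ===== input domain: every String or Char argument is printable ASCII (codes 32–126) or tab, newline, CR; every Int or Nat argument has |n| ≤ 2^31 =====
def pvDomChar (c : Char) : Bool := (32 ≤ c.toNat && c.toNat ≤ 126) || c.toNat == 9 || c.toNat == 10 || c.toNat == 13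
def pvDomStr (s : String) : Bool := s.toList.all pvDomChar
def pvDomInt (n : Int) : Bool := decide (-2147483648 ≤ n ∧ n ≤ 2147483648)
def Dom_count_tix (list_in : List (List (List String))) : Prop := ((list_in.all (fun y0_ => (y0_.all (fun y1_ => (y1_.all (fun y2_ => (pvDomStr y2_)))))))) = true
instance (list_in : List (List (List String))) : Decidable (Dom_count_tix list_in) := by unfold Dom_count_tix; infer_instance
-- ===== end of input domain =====

-- B replaces A's one-pass mutable accumulation over the 7 counters by a two-stage
-- algorithm: first group quantity strings by session in a dict, then compute each
-- type's total from the distinct sessions' buckets (substring test per distinct session).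

-- shared helper: s.partition(' ') → (before, after); exact for the single-char
-- separator ' ' (quant = chars before first space, session = chars after it, '' if absent)
def pyPartitionSpace (s : String) : String × String :=
  (String.ofList (s.toList.takeWhile (fun c => c ≠ ' ')),
   String.ofList ((s.toList.dropWhile (fun c => c ≠ ' ')).tail))

-- ===== PORT A =====
def count_tix (list_in : List (List (List String))) : List (String × Int) :=
  let ticket_dict : PySem.Dict String Int :=
    ((((((PySem.Dict.empty.insert "Child" 0).insert "FULL FESTIVAL" 0).insert
        "FRIDAY NIGHT" 0).insert "SATURDAY DAY" 0).insert "SATURDAY NIGHT" 0).insert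
        "ALL SATURDAY" 0).insert "ALL SUNDAY" 0
  (list_in.foldl (fun d order =>
    -- order[-1]: defaulted under Pre_ (A raises IndexError on an empty order)
    let tickets := PySem.List.pyGetD order (-1) []
    tickets.foldl (fun d ticket =>
      let qs := pyPartitionSpace ticket
      -- for ticket_type in ticket_dict: the keys never change during the loop
      (PySem.Dict.keys d).foldl (fun d' k =>
        if PySem.Str.isIn k qs.2 then
          -- int(quant): defaulted under Pre_ (A raises ValueError when it fails)
          d'.insert k (d'.getD k 0 + (PySem.Int.ofStr? qs.1).getD 0)
        else d') d) d) ticket_dict).items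

-- ===== PORT B =====
def count_tix_alt (list_in : List (List (List String))) : List (String × Int) :=
  -- pass 1: buckets = {session: [quant strings]} via setdefault(...).append(...)
  let buckets : PySem.Dict String (List String) :=
    list_in.foldl (fun d order =>
      (PySem.List.pyGetD order (-1) []).foldl (fun d ticket =>
        let qs := pyPartitionSpace ticket
        d.modify qs.2 [] (· ++ [qs.1])) d) PySem.Dict.empty
  -- pass 2: per-type sum of int(q) over buckets whose session contains the type
  ["Child", "FULL FESTIVAL", "FRIDAY NIGHT", "SATURDAY DAY",
   "SATURDAY NIGHT", "ALL SATURDAY", "ALL SUNDAY"].map (fun t =>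
    (t, (buckets.items.map (fun p =>
          if PySem.Str.isIn t p.1 then
            (p.2.map (fun q => (PySem.Int.ofStr? q).getD 0)).sum
          else 0)).sum))

-- ===== PRECONDITION & SPEC =====
-- Pre_ excludes exactly the inputs where A raises: an empty order (IndexError on
-- order[-1]) or a ticket whose session matches some type while its quantity part is
-- not int()-parsable (ValueError); B raises there too.
def Pre_count_tix (list_in : List (List (List String))) : Prop :=
  ∀ order ∈ list_in, order ≠ [] ∧
    ∀ ticket ∈ (order.getLast?).getD [],
      (∃ t ∈ ["Child", "FULL FESTIVAL", "FRIDAY NIGHT", "SATURDAY DAY",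
              "SATURDAY NIGHT", "ALL SATURDAY", "ALL SUNDAY"],
         PySem.Str.isIn t (pyPartitionSpace ticket).2 = true) →
      (PySem.Int.ofStr? (pyPartitionSpace ticket).1).isSome
instance (list_in : List (List (List String))) : Decidable (Pre_count_tix list_in) := by
  unfold Pre_count_tix; infer_instance
def pvWitness_count_tix : List (List (List String)) := [[["2 FULL FESTIVAL", "1 Child"]]]
def Spec_count_tix (list_in : List (List (List String))) (out : List (String × Int)) : Prop := out = count_tix_alt list_in
instance (list_in : List (List (List String))) (out : List (String × Int)) : Decidable (Spec_count_tix list_in out) := by unfold Spec_count_tix; infer_instance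

-- ===== CLAIM (what is proved, stated in full; the proofs are below) =====
def Claim_equal_count_tix : Prop := ∀ (list_in : List (List (List String))), Dom_count_tix list_in → Pre_count_tix list_in → Spec_count_tix list_in (count_tix list_in)

-- ===== LEMMAS AND PROOFS =====

-- one ticket's contribution to type t
def pvContrib (t ticket : String) : Int :=
  if PySem.Str.isIn t (pyPartitionSpace ticket).2 then
    (PySem.Int.ofStr? (pyPartitionSpace ticket).1).getD 0
  else 0

-- total contribution to type t over the whole input
def pvTotal (t : String) (list_in : List (List (List String))) : Int :=
  (list_in.map (fun order =>
    ((PySem.List.pyGetD order (-1) []).map (pvContrib t)).sum)).sum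

def pvKeys : List String :=
  ["Child", "FULL FESTIVAL", "FRIDAY NIGHT", "SATURDAY DAY",
   "SATURDAY NIGHT", "ALL SATURDAY", "ALL SUNDAY"]

def pvMk (v1 v2 v3 v4 v5 v6 v7 : Int) : PySem.Dict String Int :=
  PySem.Dict.mk [("Child", v1), ("FULL FESTIVAL", v2), ("FRIDAY NIGHT", v3),
    ("SATURDAY DAY", v4), ("SATURDAY NIGHT", v5), ("ALL SATURDAY", v6), ("ALL SUNDAY", v7)]

lemma pv_upd1 (v1 v2 v3 v4 v5 v6 v7 q : Int) (c : Bool) :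
    (if c then (pvMk v1 v2 v3 v4 v5 v6 v7).insert "Child" ((pvMk v1 v2 v3 v4 v5 v6 v7).getD "Child" 0 + q) else pvMk v1 v2 v3 v4 v5 v6 v7)
    = pvMk (v1 + if c then q else 0) v2 v3 v4 v5 v6 v7 := by
  cases c <;> simp [pvMk, PySem.Dict.insert, PySem.Dict.contains, PySem.Dict.getD, PySem.Dict.get?]

lemma pv_upd2 (v1 v2 v3 v4 v5 v6 v7 q : Int) (c : Bool) :
    (if c then (pvMk v1 v2 v3 v4 v5 v6 v7).insert "FULL FESTIVAL" ((pvMk v1 v2 v3 v4 v5 v6 v7).getD "FULL FESTIVAL" 0 + q) else pvMk v1 v2 v3 v4 v5 v6 v7)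
    = pvMk v1 (v2 + if c then q else 0) v3 v4 v5 v6 v7 := by
  cases c <;> simp [pvMk, PySem.Dict.insert, PySem.Dict.contains, PySem.Dict.getD, PySem.Dict.get?]

lemma pv_upd3 (v1 v2 v3 v4 v5 v6 v7 q : Int) (c : Bool) :
    (if c then (pvMk v1 v2 v3 v4 v5 v6 v7).insert "FRIDAY NIGHT" ((pvMk v1 v2 v3 v4 v5 v6 v7).getD "FRIDAY NIGHT" 0 + q) else pvMk v1 v2 v3 v4 v5 v6 v7)
    = pvMk v1 v2 (v3 + if c then q else 0) v4 v5 v6 v7 := by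
  cases c <;> simp [pvMk, PySem.Dict.insert, PySem.Dict.contains, PySem.Dict.getD, PySem.Dict.get?]

lemma pv_upd4 (v1 v2 v3 v4 v5 v6 v7 q : Int) (c : Bool) :
    (if c then (pvMk v1 v2 v3 v4 v5 v6 v7).insert "SATURDAY DAY" ((pvMk v1 v2 v3 v4 v5 v6 v7).getD "SATURDAY DAY" 0 + q) else pvMk v1 v2 v3 v4 v5 v6 v7)
    = pvMk v1 v2 v3 (v4 + if c then q else 0) v5 v6 v7 := by
  cases c <;> simp [pvMk, PySem.Dict.insert, PySem.Dict.contains, PySem.Dict.getD, PySem.Dict.get?]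

lemma pv_upd5 (v1 v2 v3 v4 v5 v6 v7 q : Int) (c : Bool) :
    (if c then (pvMk v1 v2 v3 v4 v5 v6 v7).insert "SATURDAY NIGHT" ((pvMk v1 v2 v3 v4 v5 v6 v7).getD "SATURDAY NIGHT" 0 + q) else pvMk v1 v2 v3 v4 v5 v6 v7)
    = pvMk v1 v2 v3 v4 (v5 + if c then q else 0) v6 v7 := by
  cases c <;> simp [pvMk, PySem.Dict.insert, PySem.Dict.contains, PySem.Dict.getD, PySem.Dict.get?]

lemma pv_upd6 (v1 v2 v3 v4 v5 v6 v7 q : Int) (c : Bool) :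
    (if c then (pvMk v1 v2 v3 v4 v5 v6 v7).insert "ALL SATURDAY" ((pvMk v1 v2 v3 v4 v5 v6 v7).getD "ALL SATURDAY" 0 + q) else pvMk v1 v2 v3 v4 v5 v6 v7)
    = pvMk v1 v2 v3 v4 v5 (v6 + if c then q else 0) v7 := by
  cases c <;> simp [pvMk, PySem.Dict.insert, PySem.Dict.contains, PySem.Dict.getD, PySem.Dict.get?]

lemma pv_upd7 (v1 v2 v3 v4 v5 v6 v7 q : Int) (c : Bool) :
    (if c then (pvMk v1 v2 v3 v4 v5 v6 v7).insert "ALL SUNDAY" ((pvMk v1 v2 v3 v4 v5 v6 v7).getD "ALL SUNDAY" 0 + q) else pvMk v1 v2 v3 v4 v5 v6 v7)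
    = pvMk v1 v2 v3 v4 v5 v6 (v7 + if c then q else 0) := by
  cases c <;> simp [pvMk, PySem.Dict.insert, PySem.Dict.contains, PySem.Dict.getD, PySem.Dict.get?]

-- A's inner key loop on the (invariant) dict shape: adds each ticket's contribution
lemma pv_step (v1 v2 v3 v4 v5 v6 v7 : Int) (ticket : String) :
    ((pvMk v1 v2 v3 v4 v5 v6 v7).keys).foldl (fun d' k =>
        if PySem.Str.isIn k (pyPartitionSpace ticket).2 then
          d'.insert k (d'.getD k 0 + (PySem.Int.ofStr? (pyPartitionSpace ticket).1).getD 0)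
        else d') (pvMk v1 v2 v3 v4 v5 v6 v7)
    = pvMk (v1 + pvContrib "Child" ticket) (v2 + pvContrib "FULL FESTIVAL" ticket)
        (v3 + pvContrib "FRIDAY NIGHT" ticket) (v4 + pvContrib "SATURDAY DAY" ticket)
        (v5 + pvContrib "SATURDAY NIGHT" ticket) (v6 + pvContrib "ALL SATURDAY" ticket)
        (v7 + pvContrib "ALL SUNDAY" ticket) := by
  have hk : (pvMk v1 v2 v3 v4 v5 v6 v7).keys
      = ["Child", "FULL FESTIVAL", "FRIDAY NIGHT", "SATURDAY DAY",
         "SATURDAY NIGHT", "ALL SATURDAY", "ALL SUNDAY"] := rfl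
  rw [hk]
  simp only [List.foldl_cons, List.foldl_nil, pv_upd1, pv_upd2, pv_upd3, pv_upd4,
    pv_upd5, pv_upd6, pv_upd7, pvContrib]

-- A's ticket loop
lemma pv_tickets (tks : List String) (v1 v2 v3 v4 v5 v6 v7 : Int) :
    tks.foldl (fun d ticket =>
      let qs := pyPartitionSpace ticket
      (PySem.Dict.keys d).foldl (fun d' k =>
        if PySem.Str.isIn k qs.2 then
          d'.insert k (d'.getD k 0 + (PySem.Int.ofStr? qs.1).getD 0)
        else d') d) (pvMk v1 v2 v3 v4 v5 v6 v7)
    = pvMk (v1 + (tks.map (pvContrib "Child")).sum)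
        (v2 + (tks.map (pvContrib "FULL FESTIVAL")).sum)
        (v3 + (tks.map (pvContrib "FRIDAY NIGHT")).sum)
        (v4 + (tks.map (pvContrib "SATURDAY DAY")).sum)
        (v5 + (tks.map (pvContrib "SATURDAY NIGHT")).sum)
        (v6 + (tks.map (pvContrib "ALL SATURDAY")).sum)
        (v7 + (tks.map (pvContrib "ALL SUNDAY")).sum) := by
  induction tks generalizing v1 v2 v3 v4 v5 v6 v7 with
  | nil => simp
  | cons tk rest ih =>
    simp only [List.foldl, pv_step, ih, List.map, List.sum_cons]
    ring_nf

-- A's order loop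
lemma pv_orders (l : List (List (List String))) (v1 v2 v3 v4 v5 v6 v7 : Int) :
    l.foldl (fun d order =>
      let tickets := PySem.List.pyGetD order (-1) []
      tickets.foldl (fun d ticket =>
        let qs := pyPartitionSpace ticket
        (PySem.Dict.keys d).foldl (fun d' k =>
          if PySem.Str.isIn k qs.2 then
            d'.insert k (d'.getD k 0 + (PySem.Int.ofStr? qs.1).getD 0)
          else d') d) d) (pvMk v1 v2 v3 v4 v5 v6 v7)
    = pvMk (v1 + pvTotal "Child" l) (v2 + pvTotal "FULL FESTIVAL" l)
        (v3 + pvTotal "FRIDAY NIGHT" l) (v4 + pvTotal "SATURDAY DAY" l)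
        (v5 + pvTotal "SATURDAY NIGHT" l) (v6 + pvTotal "ALL SATURDAY" l)
        (v7 + pvTotal "ALL SUNDAY" l) := by
  induction l generalizing v1 v2 v3 v4 v5 v6 v7 with
  | nil => simp [pvTotal]
  | cons o rest ih =>
    simp only [List.foldl, pv_tickets, ih, pvTotal, List.map, List.sum_cons]
    ring_nf

-- B side: value of one bucket entry for type t
def pvBV (t : String) (p : String × List String) : Int :=
  if PySem.Str.isIn t p.1 then (p.2.map (fun q => (PySem.Int.ofStr? q).getD 0)).sum else 0

-- B side: pass-2 sum for type t over a bucket dict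
def pvF (t : String) (d : PySem.Dict String (List String)) : Int :=
  (d.items.map (pvBV t)).sum

-- grouping step: appending one quant to its session's bucket adds its contribution
lemma pv_modify_step (l : List (String × List String)) (hnd : (l.map Prod.fst).Nodup)
    (s q t : String) :
    pvF t ((PySem.Dict.mk l).modify s [] (· ++ [q]))
    = pvF t (PySem.Dict.mk l) + (if PySem.Str.isIn t s then (PySem.Int.ofStr? q).getD 0 else 0) := by
  induction l with
  | nil =>
    simp only [pvF, PySem.Dict.modify, PySem.Dict.insert, PySem.Dict.contains,
      PySem.Dict.getD, PySem.Dict.get?]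
    simp [pvBV]
  | cons p rest ih =>
    have hnd' : (rest.map Prod.fst).Nodup := hnd.of_cons
    by_cases hps : p.1 = s
    · -- head bucket is the one being extended; no other key equals s
      have hrest : ∀ p' ∈ rest, p'.1 ≠ s := by
        intro p' hp' he
        exact (List.nodup_cons.mp hnd).1 (by
          rw [hps, ← he]; exact List.mem_map_of_mem hp')
      simp only [PySem.Dict.modify, PySem.Dict.insert, PySem.Dict.contains,
        PySem.Dict.getD, PySem.Dict.get?]
      have hcont : ((p :: rest).any fun pp => pp.1 == s) = true := by
        simp [hps]
      have hfind : List.find? (fun pp => pp.1 == s) (p :: rest) = some p := by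
        simp [List.find?, hps]
      rw [hcont, if_pos rfl, hfind]
      simp only [pvF, PySem.Dict.items, List.map_cons, List.map_map, hps,
        beq_self_eq_true, Option.map_some, Option.getD_some, List.sum_cons, pvBV]
      have hmap2 : List.map (pvBV t ∘ fun p' : String × List String =>
            if p'.1 == s then (s, p.2 ++ [q]) else p') rest = List.map (pvBV t) rest :=
        List.map_congr_left (fun p' hp' => by
          simp [Function.comp, hrest p' hp'])
      rw [hmap2]
      split_ifs <;> first | (simp only [List.map_append, List.sum_append, List.map_cons, List.map_nil, List.sum_cons, List.sum_nil]; ring) | ring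
    · -- head untouched: the step commutes past the head
      have hpb : (p.1 == s) = false := by simp [hps]
      have hstep : ((PySem.Dict.mk (p :: rest)).modify s [] (· ++ [q])).items
          = p :: ((PySem.Dict.mk rest).modify s [] (· ++ [q])).items := by
        simp only [PySem.Dict.modify, PySem.Dict.insert, PySem.Dict.contains,
          PySem.Dict.getD, PySem.Dict.get?, PySem.Dict.items]
        simp only [List.any_cons, hpb, Bool.false_or, List.find?, hpb]
        by_cases hc : (rest.any fun pp => pp.1 == s) = true
        · simp [hc, hpb, hps]
        · simp [hc, hpb, hps]
      simp only [pvF, hstep, List.map_cons, List.sum_cons]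
      have := ih hnd'
      simp only [pvF] at this
      rw [this]; ring


-- keys stay nodup through one modify step
lemma pv_nodup_step (d : PySem.Dict String (List String)) (hnd : d.keys.Nodup)
    (s q : String) : (d.modify s [] (· ++ [q])).keys.Nodup := by
  have := PySem.Dict.nodup_keys_foldl_modify_key (l := [q]) (key := fun _ => s)
    (d0 := []) (f := fun _ x v => v ++ [x]) (d := d) hnd
  simpa using this

-- B's pass-1 double fold: pvF of the result is the total contribution (with Nodup kept)
lemma pv_build (l : List (List (List String))) (t : String) :
    ∀ (d : PySem.Dict String (List String)), d.keys.Nodup →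
    pvF t (l.foldl (fun d order =>
      (PySem.List.pyGetD order (-1) []).foldl (fun d ticket =>
        d.modify (pyPartitionSpace ticket).2 [] (· ++ [(pyPartitionSpace ticket).1])) d) d)
    = pvF t d + pvTotal t l ∧
    (l.foldl (fun d order =>
      (PySem.List.pyGetD order (-1) []).foldl (fun d ticket =>
        d.modify (pyPartitionSpace ticket).2 [] (· ++ [(pyPartitionSpace ticket).1])) d) d).keys.Nodup := by
  have hin : ∀ (tks : List String) (d : PySem.Dict String (List String)), d.keys.Nodup →
      pvF t (tks.foldl (fun d ticket =>
        d.modify (pyPartitionSpace ticket).2 [] (· ++ [(pyPartitionSpace ticket).1])) d)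
      = pvF t d + (tks.map (pvContrib t)).sum ∧
      (tks.foldl (fun d ticket =>
        d.modify (pyPartitionSpace ticket).2 [] (· ++ [(pyPartitionSpace ticket).1])) d).keys.Nodup := by
    intro tks
    induction tks with
    | nil => intro d hd; exact ⟨by simp, hd⟩
    | cons tk rest ih =>
      intro d hd
      obtain ⟨hv, hn⟩ := ih (d.modify (pyPartitionSpace tk).2 [] (· ++ [(pyPartitionSpace tk).1]))
        (pv_nodup_step d hd _ _)
      constructor
      · simp only [List.foldl] at hv ⊢
        rw [hv]
        obtain ⟨items⟩ := d
        rw [pv_modify_step items (by simpa [PySem.Dict.keys] using hd)]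
        simp only [List.map_cons, List.sum_cons, pvContrib]
        ring
      · simpa only [List.foldl] using hn
  induction l with
  | nil => intro d hd; exact ⟨by simp [pvTotal], hd⟩
  | cons o rest ih =>
    intro d hd
    obtain ⟨hv1, hn1⟩ := hin (PySem.List.pyGetD o (-1) []) d hd
    obtain ⟨hv2, hn2⟩ := ih _ hn1
    refine ⟨?_, by simpa only [List.foldl] using hn2⟩
    simp only [List.foldl] at hv2 ⊢
    rw [hv2, hv1]
    simp only [pvTotal, List.map_cons, List.sum_cons]
    ring

-- ===== VERDICT (by name: the statement is the Claim_ definition above) =====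
theorem count_tix_spec : Claim_equal_count_tix := by
  intro list_in _ _
  show count_tix list_in = count_tix_alt list_in
  have h0 : (((((((PySem.Dict.empty.insert "Child" (0:Int)).insert "FULL FESTIVAL" 0).insert
        "FRIDAY NIGHT" 0).insert "SATURDAY DAY" 0).insert "SATURDAY NIGHT" 0).insert
        "ALL SATURDAY" 0).insert "ALL SUNDAY" 0) = pvMk 0 0 0 0 0 0 0 := by decide
  have hlam : ∀ t : String, (fun p : String × List String =>
      if PySem.Str.isIn t p.1 then (p.2.map (fun q => (PySem.Int.ofStr? q).getD 0)).sum else 0)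
      = pvBV t := fun t => rfl
  have hbv : ∀ t : String,
      ((list_in.foldl (fun d order =>
          (PySem.List.pyGetD order (-1) []).foldl (fun d ticket =>
            d.modify (pyPartitionSpace ticket).2 [] (· ++ [(pyPartitionSpace ticket).1])) d)
          PySem.Dict.empty).items.map (pvBV t)).sum
      = pvTotal t list_in := by
    intro t
    have := (pv_build list_in t PySem.Dict.empty (by decide)).1
    simpa [pvF, PySem.Dict.empty] using this
  simp only [count_tix, count_tix_alt, h0]
  rw [pv_orders]
  simp only [List.map_cons, List.map_nil, hlam, hbv]
  simp [pvMk]
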